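-- pv_equiv track=rewrite | github.com/kslee001/Dacon2301_optical-character-recognition | functions.py | correct_prediction
-- ===== SOURCE A (Python) =====
-- def correct_prediction(word):
--     def remove_duplicates(text):
--         if len(text) > 1:
--             letters = [text[0]] + [letter for idx, letter in enumerate(text[1:], start=1) if text[idx] != text[idx-1]]
--         elif len(text) == 1:
--             letters = [text[0]]
--         else:
--             return ""
--         return "".join(letters)
--
--     parts = word.split("-")
--     parts = [remove_duplicates(part) for part in parts]
--     corrected_word = "".join(parts)
--     return corrected_word
-- ===== SOURCE B (Python) =====
-- def correct_prediction(word):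
--     # Single pass: collapse consecutive duplicates, drop '-', reset at part boundaries.
--     out = []
--     prev = None
--     for c in word:
--         if c == '-':
--             prev = None
--         else:
--             if c != prev:
--                 out.append(c)
--             prev = c
--     return "".join(out)
-- ===== Notes on version B (the rewrite author's own statement) =====
-- stated objective: faster
-- what changed: Replaces the split-on-hyphen / per-part index-based comprehension / join pipeline by one linear pass with a prev sentinel that is reset at each hyphen.
import Mathlib
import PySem

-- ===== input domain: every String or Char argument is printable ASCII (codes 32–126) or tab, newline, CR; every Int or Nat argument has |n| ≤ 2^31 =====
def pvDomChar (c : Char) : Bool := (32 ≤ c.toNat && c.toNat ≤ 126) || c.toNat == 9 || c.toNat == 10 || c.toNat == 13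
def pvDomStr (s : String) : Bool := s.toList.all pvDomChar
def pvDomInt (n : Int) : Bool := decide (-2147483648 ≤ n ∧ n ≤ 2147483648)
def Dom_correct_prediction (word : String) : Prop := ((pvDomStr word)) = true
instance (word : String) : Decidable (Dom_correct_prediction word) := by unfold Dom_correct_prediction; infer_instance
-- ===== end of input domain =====

-- B replaces A's split / per-part collapse / join pipeline by one linear pass with a
-- prev sentinel reset at each hyphen (measured faster in a timing run; same O(n)).

-- ===== PORT A =====
-- remove_duplicates(text): the comprehension over enumerate(text[1:], start=1)
def pvRdup (text : List Char) : List Char :=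
  if text.length > 1 then
    (PySem.List.pyGet? text 0).toList ++
      (PySem.List.enumerate (PySem.List.slice text (some 1) none) 1).filterMap
        (fun p => if PySem.List.pyGet? text p.1 ≠ PySem.List.pyGet? text (p.1 - 1)
                  then some p.2 else none)
  else if text.length == 1 then (PySem.List.pyGet? text 0).toList
  else []

def correct_prediction (word : String) : String :=
  String.ofList (PySem.Chars.join [] ((PySem.Chars.splitOn word.toList ['-']).map pvRdup))

-- ===== PORT B =====
def pvBStep (st : List Char × Option Char) (c : Char) : List Char × Option Char :=
  if c = '-' then (st.1, none)
  else ((if st.2 ≠ some c then st.1 ++ [c] else st.1), some c)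

def correct_prediction_alt (word : String) : String :=
  String.ofList (word.toList.foldl pvBStep ([], none)).1

-- ===== PRECONDITION & SPEC =====
def Spec_correct_prediction (word : String) (out : String) : Prop := out = correct_prediction_alt word
instance (word : String) (out : String) : Decidable (Spec_correct_prediction word out) := by unfold Spec_correct_prediction; infer_instance

-- ===== CLAIM (what is proved, stated in full; the proofs are below) =====
def Claim_equal_correct_prediction : Prop := ∀ (word : String), Dom_correct_prediction word → Spec_correct_prediction word (correct_prediction word)

-- ===== LEMMAS AND PROOFS =====

-- collapse of consecutive duplicates, given the previous kept character
def pvCgo : Char → List Char → List Char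
  | _, [] => []
  | p, c :: rest => if c = p then pvCgo p rest else c :: pvCgo c rest

def pvCollapse : List Char → List Char
  | [] => []
  | c :: rest => c :: pvCgo c rest

-- reference single pass (B without the accumulator)
def pvBgo : Option Char → List Char → List Char
  | _, [] => []
  | prev, c :: rest =>
    if c = '-' then pvBgo none rest
    else if prev = some c then pvBgo prev rest else c :: pvBgo (some c) rest

-- reference split on '-'
def pvSplit (cur : List Char) : List Char → List (List Char)
  | [] => [cur]
  | c :: rest => if c = '-' then cur :: pvSplit [] rest else pvSplit (cur ++ [c]) rest

theorem pvGo_eq (fuel : Nat) : ∀ (l cur : List Char) (acc : List (List Char)), l.length < fuel →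
    PySem.Chars.splitOn.go ['-'] fuel l cur acc = acc.reverse ++ pvSplit cur.reverse l := by
  induction fuel with
  | zero => intro l cur acc h; omega
  | succ f ih =>
    intro l cur acc h
    cases l with
    | nil => simp [PySem.Chars.splitOn.go, pvSplit]
    | cons c rest =>
      by_cases hc : c = '-'
      · subst hc
        rw [show PySem.Chars.splitOn.go ['-'] (f+1) ('-'::rest) cur acc
              = PySem.Chars.splitOn.go ['-'] f rest [] (cur.reverse :: acc)
            from by rw [PySem.Chars.splitOn.go]; simp [List.isPrefixOf]]
        rw [ih rest [] (cur.reverse :: acc) (by simpa using Nat.lt_of_succ_lt_succ h)]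
        simp [pvSplit]
      · rw [PySem.Chars.splitOn.go]
        have hpre : List.isPrefixOf ['-'] (c :: rest) = false := by
          simp [List.isPrefixOf]
          exact fun hh => hc hh.symm
        rw [if_neg (by rw [hpre]; simp)]
        rw [ih rest (c :: cur) acc (by simpa using Nat.lt_of_succ_lt_succ h)]
        simp [pvSplit, hc]

theorem pvSplitOn_eq (l : List Char) :
    PySem.Chars.splitOn l ['-'] = pvSplit [] l := by
  have := pvGo_eq (l.length + 1) l [] [] (by omega)
  simpa [PySem.Chars.splitOn] using this

theorem pvEnumFilt (l : List Char) : ∀ (n i : Nat) (x : Char), l.length - (i+1) = n →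
    i < l.length → l[i]? = some x →
    (PySem.List.enumerate (l.drop (i+1)) ((i : Int) + 1)).filterMap
      (fun p => if PySem.List.pyGet? l p.1 ≠ PySem.List.pyGet? l (p.1 - 1)
                then some p.2 else none)
      = pvCgo x (l.drop (i+1)) := by
  intro n
  induction n with
  | zero =>
    intro i x hn hi hx
    have : l.drop (i+1) = [] := by
      apply List.drop_eq_nil_of_le; omega
    simp [this, pvCgo]
  | succ m ih =>
    intro i x hn hi hx
    have hilen : i + 1 < l.length := by omega
    obtain ⟨y, hy⟩ : ∃ y, l[i+1]? = some y :=
      ⟨l[i+1], List.getElem?_eq_getElem hilen⟩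
    have hdrop : l.drop (i+1) = y :: l.drop (i+2) := by
      rw [List.drop_eq_getElem_cons hilen]
      rw [List.getElem?_eq_getElem hilen] at hy
      rw [Option.some.inj hy]
    have hg1 : PySem.List.pyGet? l ((i:Int)+1) = some y := by
      rw [show ((i:Int)+1) = ((i+1 : Nat) : Int) from by push_cast; ring,
          PySem.List.pyGet?_natCast, hy]
    have hg2 : PySem.List.pyGet? l ((i:Int)+1-1) = some x := by
      rw [show ((i:Int)+1-1) = ((i : Nat) : Int) from by ring,
          PySem.List.pyGet?_natCast, hx]
    have ih' := ih (i+1) y (by omega) hilen hy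
    rw [show (((i+1 : Nat) : Int) + 1) = ((i:Int)+1+1) from by push_cast; ring] at ih'
    rw [hdrop]
    rw [show PySem.List.enumerate (y :: l.drop (i+2)) ((i:Int)+1)
          = ((i:Int)+1, y) :: PySem.List.enumerate (l.drop (i+2)) ((i:Int)+1+1)
        from by rw [PySem.List.enumerate]]
    by_cases hEq : y = x
    · rw [List.filterMap_cons_none (by simp [hg1, hEq, hx])]
      rw [ih', show pvCgo x (y :: l.drop (i+2)) = pvCgo x (l.drop (i+2))
            from by simp [pvCgo, hEq], hEq]
    · rw [List.filterMap_cons_some (b := y) (by simp [hg1, hEq, hx])]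
      rw [ih', show pvCgo x (y :: l.drop (i+2)) = y :: pvCgo y (l.drop (i+2))
            from by simp [pvCgo, hEq]]

theorem pvRdup_eq (l : List Char) : pvRdup l = pvCollapse l := by
  match l with
  | [] => simp [pvRdup, pvCollapse]
  | [c] => simp [pvRdup, pvCollapse, PySem.List.pyGet?, PySem.List.pyIdx?, pvCgo]
  | a :: b :: t =>
    have h0 : PySem.List.pyGet? (a :: b :: t) 0 = some a := by
      rw [show (0:Int) = ((0:Nat):Int) from rfl, PySem.List.pyGet?_natCast]; rfl
    have hslice : PySem.List.slice (a :: b :: t) (some 1) none = (a :: b :: t).drop 1 := by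
      rw [PySem.List.slice_from _ (by norm_num)]; norm_num
    have henum := pvEnumFilt (a :: b :: t) ((a :: b :: t).length - 1) 0 a rfl (by simp) rfl
    norm_num at henum
    simp only [pvRdup, if_pos (by simp : (a :: b :: t).length > 1), h0, hslice]
    norm_num [henum]
    simp [pvCollapse]

theorem pvCgo_append (cur : List Char) : ∀ (p c : Char),
    pvCgo p (cur ++ [c]) = pvCgo p cur ++ (if c = (cur.getLast?).getD p then [] else [c]) := by
  induction cur with
  | nil => intro p c; simp [pvCgo]
  | cons a t ih =>
    intro p c
    by_cases hap : a = p
    · subst hap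
      simp only [List.cons_append, pvCgo]
      rw [ih a c, List.getLast?_cons]
      simp
    · simp only [List.cons_append, pvCgo, if_neg hap]
      rw [ih a c, List.getLast?_cons]
      simp

theorem pvCollapse_append (cur : List Char) (c : Char) :
    pvCollapse (cur ++ [c]) = pvCollapse cur ++ (if cur.getLast? = some c then [] else [c]) := by
  cases cur with
  | nil => simp [pvCollapse, pvCgo]
  | cons a t =>
    simp only [List.cons_append, pvCollapse]
    rw [pvCgo_append t a c, List.getLast?_cons]
    by_cases h : c = t.getLast?.getD a
    · simp [h]
    · rw [if_neg h, if_neg (fun hh => h (Option.some.inj hh).symm)]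

theorem pvBridge : ∀ (l cur : List Char),
    ((pvSplit cur l).map pvCollapse).flatten = pvCollapse cur ++ pvBgo cur.getLast? l := by
  intro l
  induction l with
  | nil => intro cur; simp [pvSplit, pvBgo]
  | cons c rest ih =>
    intro cur
    by_cases hc : c = '-'
    · subst hc
      rw [show pvSplit cur ('-'::rest) = cur :: pvSplit [] rest from by simp [pvSplit],
          show pvBgo cur.getLast? ('-'::rest) = pvBgo none rest from by simp [pvBgo]]
      rw [List.map_cons, List.flatten_cons, ih []]
      simp [pvCollapse]
    · simp only [pvSplit, pvBgo, if_neg hc]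
      rw [ih (cur ++ [c]), pvCollapse_append]
      have hlast : (cur ++ [c]).getLast? = some c := by simp
      rw [hlast]
      by_cases h : cur.getLast? = some c
      · simp [h]
      · simp [h]

theorem pvFoldl_eq : ∀ (l : List Char) (acc : List Char) (prev : Option Char),
    (l.foldl pvBStep (acc, prev)).1 = acc ++ pvBgo prev l := by
  intro l
  induction l with
  | nil => intro acc prev; simp [pvBgo]
  | cons c rest ih =>
    intro acc prev
    by_cases hc : c = '-'
    · subst hc
      simp only [List.foldl_cons, pvBStep, pvBgo]
      exact ih acc none
    · simp only [List.foldl_cons, pvBStep, if_neg hc, pvBgo]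
      by_cases hp : prev = some c
      · rw [if_pos hp, if_neg (by simp [hp])]
        rw [ih acc (some c)]
        simp [hp]
      · rw [if_neg hp, if_pos (by simp [hp])]
        rw [ih (acc ++ [c]) (some c)]
        simp

theorem pvJoinNil (parts : List (List Char)) :
    PySem.Chars.join [] parts = parts.flatten := by
  simp only [PySem.Chars.join, List.intercalate]
  induction parts with
  | nil => simp
  | cons p ps ih =>
    cases ps with
    | nil => simp
    | cons q qs =>
      rw [List.intersperse_cons₂] at *
      simp only [List.flatten_cons] at *
      simp [ih]

-- ===== VERDICT (by name: the statement is the Claim_ definition above) =====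
theorem correct_prediction_spec : Claim_equal_correct_prediction := by
  intro word _
  unfold Spec_correct_prediction correct_prediction correct_prediction_alt
  rw [pvSplitOn_eq, pvJoinNil]
  have hmap : (pvSplit [] word.toList).map pvRdup = (pvSplit [] word.toList).map pvCollapse :=
    List.map_congr_left (fun x _ => pvRdup_eq x)
  rw [hmap, pvBridge word.toList [], pvFoldl_eq word.toList [] none]
  simp [pvCollapse]
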